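-- pv_equiv track=rewrite | github.com/iashevyakov/algos-sql-training | algos-ya-training-8/dynamic/match_game.py | get_dp_last_elem
-- ===== SOURCE A (Python) =====
-- def is_prime(n: int) -> bool:
--     if n <= 1:
--         return False
--     for i in range(2, int(n ** 0.5) + 1):
--         if n % i == 0:
--             return False
--     return True
--
-- def get_dp_last_elem(n: int) -> int:
--     dp = [False] * (n + 1)
--     dp[0] = False
--
--     for i in range(1, n + 1):
--         dp[i] = False
--         for match_move in [1, 2, 3]:
--             if i >= match_move:
--                 match_remain = i - match_move
--                 if not is_prime(match_remain) and not dp[match_remain]: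
--                     dp[i] = True
--                     break
--     return dp[n]
-- ===== SOURCE B (Python) =====
-- def get_dp_last_elem(n: int) -> int:
--     # Losing positions of the 1/2/3-match game with the "non-prime target" rule
--     # are exactly the multiples of 4, so the DP collapses to a parity-style test.
--     return n % 4 != 0
-- ===== Notes on version B (the rewrite author's own statement) =====
-- stated objective: faster
-- what changed: Replaced the O(n*sqrt(n)) win/lose DP table (with a trial-division primality test per cell) by its closed form n % 4 != 0, proved correct by the invariant that the losing positions are exactly the multiples of 4.
import Mathlib
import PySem

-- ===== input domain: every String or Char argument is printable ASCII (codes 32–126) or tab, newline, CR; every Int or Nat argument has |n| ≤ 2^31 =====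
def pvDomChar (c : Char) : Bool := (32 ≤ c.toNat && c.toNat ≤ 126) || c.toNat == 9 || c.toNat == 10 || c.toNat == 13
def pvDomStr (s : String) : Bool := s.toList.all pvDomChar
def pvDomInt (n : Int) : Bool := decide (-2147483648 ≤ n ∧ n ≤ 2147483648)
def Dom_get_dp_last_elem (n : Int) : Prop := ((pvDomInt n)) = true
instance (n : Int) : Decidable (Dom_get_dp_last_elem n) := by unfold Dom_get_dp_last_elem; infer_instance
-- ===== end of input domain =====

-- B replaces A's win/lose DP table (with a trial-division primality test in the inner loop)
-- by the closed form n % 4 != 0: the losing positions are exactly the multiples of 4.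

-- ===== PORT A =====
-- is_prime: 'int(n ** 0.5)' is ported as Nat.sqrt, exact on the domain 0 ≤ n ≤ 2^31
-- (float sqrt is correctly rounded there); the loop with early 'return False' is List.all.
def is_prime (n : Int) : Bool :=
  if n ≤ 1 then false
  else (PySem.List.pyRange 2 ((Nat.sqrt n.toNat : Int) + 1) 1).all
    (fun i => !(PySem.Int.mod n i == 0))

-- the inner 'for match_move in [1, 2, 3]: … break': the value dp[i] ends up with
def dpMove (dp : List Bool) (i : Int) : List Int → Bool
  | [] => false
  | m :: ms =>
    if m ≤ i then
      if !is_prime (i - m) && !((PySem.List.pyGet? dp (i - m)).getD false) then true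
      else dpMove dp i ms
    else dpMove dp i ms

def get_dp_last_elem (n : Int) : Bool :=
  let dp0 : List Bool := (List.replicate (n + 1).toNat false).set 0 false
  let dpF := (PySem.List.pyRange 1 (n + 1) 1).foldl
    (fun dp i => dp.set i.toNat (dpMove dp i [1, 2, 3])) dp0
  (PySem.List.pyGet? dpF n).getD false   -- dp[n]; in range whenever n ≥ 0 (= Pre_)

-- ===== PORT B =====
def get_dp_last_elem_alt (n : Int) : Bool := decide (PySem.Int.mod n 4 ≠ 0)

-- ===== PRECONDITION & SPEC =====
-- A raises IndexError for n < 0 (dp[0] on an empty list); those inputs are excluded.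
def Pre_get_dp_last_elem (n : Int) : Prop := 0 ≤ n
instance (n : Int) : Decidable (Pre_get_dp_last_elem n) := by unfold Pre_get_dp_last_elem; infer_instance
def pvWitness_get_dp_last_elem : Int := (7)

def Spec_get_dp_last_elem (n : Int) (out : Bool) : Prop := out = get_dp_last_elem_alt n
instance (n : Int) (out : Bool) : Decidable (Spec_get_dp_last_elem n out) := by unfold Spec_get_dp_last_elem; infer_instance

-- ===== CLAIM (what is proved, stated in full; the proofs are below) =====
def Claim_equal_get_dp_last_elem : Prop := ∀ (n : Int), Dom_get_dp_last_elem n → Pre_get_dp_last_elem n → Spec_get_dp_last_elem n (get_dp_last_elem n)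

-- ===== LEMMAS AND PROOFS =====

-- multiples of 4 are never prime to A's test (0 fails the n ≤ 1 guard; 4k with k ≥ 1 has the divisor 2 ≤ √(4k))
lemma is_prime_mul4 (j : ℕ) (hj : j % 4 = 0) : is_prime (j : Int) = false := by
  rcases Nat.eq_zero_or_pos j with h0 | hpos
  · subst h0; decide
  · have h4 : 4 ≤ j := by omega
    unfold is_prime
    rw [if_neg (by exact_mod_cast (by omega : ¬ (j : Int) ≤ 1))]
    simp only [Int.toNat_natCast]
    rw [List.all_eq_false]
    refine ⟨2, ?_, ?_⟩
    · rw [PySem.List.mem_pyRange_one]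
      have hs : 2 ≤ Nat.sqrt j := Nat.le_sqrt.mpr (by omega)
      have : (2:Int) ≤ (Nat.sqrt j : Int) := by exact_mod_cast hs
      exact ⟨by norm_num, by omega⟩
    · have hm : PySem.Int.mod (j:Int) 2 = 0 := by
        rw [PySem.Int.mod_eq_emod_of_pos (by norm_num)]; omega
      simp
      omega

-- the inner loop at position k+1, when dp agrees with the closed form up to k
lemma dpMove_eval (dp : List Bool) (k N : ℕ) (hk : k + 1 < N) (hlen : dp.length = N)
    (hdp : ∀ j : ℕ, j < N → dp.getD j false = decide (j ≤ k ∧ j % 4 ≠ 0)) :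
    dpMove dp ((k : Int) + 1) [1, 2, 3] = decide ((k + 1) % 4 ≠ 0) := by
  have hget : ∀ j : ℕ, j ≤ k → ((PySem.List.pyGet? dp (j : Int)).getD false) = decide (j % 4 ≠ 0) := by
    intro j hj
    rw [PySem.List.pyGet?_natCast, ← List.getD_eq_getElem?_getD, hdp j (by omega)]
    simp [hj]
  simp only [dpMove]
  rcases (by omega : k % 4 = 0 ∨ k % 4 = 1 ∨ k % 4 = 2 ∨ k % 4 = 3) with h|h|h|h
  · have e1 : (k:Int) + 1 - 1 = ((k:ℕ):Int) := by omega
    rw [if_pos (by omega : (1:Int) ≤ (k:Int)+1), e1, is_prime_mul4 k h, hget k le_rfl]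
    simp [h]
    omega
  · have e1 : (k:Int) + 1 - 1 = ((k:ℕ):Int) := by omega
    have e2 : (k:Int) + 1 - 2 = (((k-1:ℕ)):Int) := by omega
    rw [if_pos (by omega : (1:Int) ≤ (k:Int)+1), e1, hget k le_rfl,
        if_pos (by omega : (2:Int) ≤ (k:Int)+1), e2,
        is_prime_mul4 (k-1) (by omega), hget (k-1) (by omega)]
    simp [h, (by omega : (k-1) % 4 = 0)]
    omega
  · have e1 : (k:Int) + 1 - 1 = ((k:ℕ):Int) := by omega
    have e2 : (k:Int) + 1 - 2 = (((k-1:ℕ)):Int) := by omega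
    have e3 : (k:Int) + 1 - 3 = (((k-2:ℕ)):Int) := by omega
    rw [if_pos (by omega : (1:Int) ≤ (k:Int)+1), e1, hget k le_rfl,
        if_pos (by omega : (2:Int) ≤ (k:Int)+1), e2, hget (k-1) (by omega),
        if_pos (by omega : (3:Int) ≤ (k:Int)+1), e3,
        is_prime_mul4 (k-2) (by omega), hget (k-2) (by omega)]
    simp [h, (by omega : (k-1) % 4 = 1), (by omega : (k-2) % 4 = 0)]
    omega
  · have e1 : (k:Int) + 1 - 1 = ((k:ℕ):Int) := by omega
    have e2 : (k:Int) + 1 - 2 = (((k-1:ℕ)):Int) := by omega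
    have e3 : (k:Int) + 1 - 3 = (((k-2:ℕ)):Int) := by omega
    rw [if_pos (by omega : (1:Int) ≤ (k:Int)+1), e1, hget k le_rfl,
        if_pos (by omega : (2:Int) ≤ (k:Int)+1), e2, hget (k-1) (by omega),
        if_pos (by omega : (3:Int) ≤ (k:Int)+1), e3, hget (k-2) (by omega)]
    simp [h, (by omega : (k-1) % 4 = 2), (by omega : (k-2) % 4 = 1), (by omega : (k+1) % 4 = 0)]

-- loop invariant: after processing 1..k the table holds the closed form up to k (false above)
lemma dp_inv (n : Int) (k : ℕ) (hk : (k : Int) ≤ n) :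
    ((PySem.List.pyRange 1 ((k : Int) + 1) 1).foldl
        (fun dp i => dp.set i.toNat (dpMove dp i [1, 2, 3]))
        ((List.replicate (n + 1).toNat false).set 0 false)).length = (n + 1).toNat ∧
    ∀ j : ℕ, j < (n + 1).toNat →
      ((PySem.List.pyRange 1 ((k : Int) + 1) 1).foldl
        (fun dp i => dp.set i.toNat (dpMove dp i [1, 2, 3]))
        ((List.replicate (n + 1).toNat false).set 0 false)).getD j false
        = decide (j ≤ k ∧ j % 4 ≠ 0) := by
  induction k with
  | zero =>
    rw [PySem.List.pyRange_one_eq_nil (by norm_num)]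
    simp only [List.foldl_nil]
    refine ⟨by simp, ?_⟩
    intro j hj
    rcases Nat.eq_zero_or_pos j with h0 | hpos
    · subst h0
      simp [List.getD_eq_getElem?_getD, hj]
    · simp [List.getD_eq_getElem?_getD]
      omega
  | succ k ih =>
    obtain ⟨ihl, ihd⟩ := ih (by omega)
    have hrange : PySem.List.pyRange 1 ((k:Int) + 1 + 1) 1
        = PySem.List.pyRange 1 ((k:Int) + 1) 1 ++ [(k:Int) + 1] :=
      PySem.List.pyRange_one_succ_right (by omega)
    have hkN : k + 1 < (n + 1).toNat := by omega
    rw [show ((k+1 : ℕ) : Int) = (k:Int) + 1 by push_cast; ring, hrange, List.foldl_append]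
    simp only [List.foldl_cons, List.foldl_nil]
    set dp := (PySem.List.pyRange 1 ((k : Int) + 1) 1).foldl
        (fun dp i => dp.set i.toNat (dpMove dp i [1, 2, 3]))
        ((List.replicate (n + 1).toNat false).set 0 false) with hdp
    have hmove : dpMove dp ((k:Int) + 1) [1, 2, 3] = decide ((k + 1) % 4 ≠ 0) :=
      dpMove_eval dp k (n+1).toNat hkN ihl ihd
    constructor
    · simp [ihl]
    · intro j hj
      rw [show ((k:Int) + 1).toNat = k + 1 by omega]
      rcases eq_or_ne j (k+1) with rfl | hne
      · rw [List.getD_eq_getElem?_getD, List.getElem?_set_self (by omega), hmove]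
        simp
      · rw [List.getD_eq_getElem?_getD, List.getElem?_set_ne (by omega),
            ← List.getD_eq_getElem?_getD, ihd j hj]
        exact decide_eq_decide.mpr (by constructor <;> rintro ⟨h1, h2⟩ <;> exact ⟨by omega, h2⟩)

-- ===== VERDICT (by name: the statement is the Claim_ definition above) =====
theorem get_dp_last_elem_spec : Claim_equal_get_dp_last_elem := by
  intro n _ hn
  unfold Pre_get_dp_last_elem at hn
  unfold Spec_get_dp_last_elem get_dp_last_elem get_dp_last_elem_alt
  obtain ⟨hl, hd⟩ := dp_inv n n.toNat (by omega)
  rw [show ((n.toNat : Int) + 1) = n + 1 by omega] at hd hl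
  simp only []
  rw [PySem.List.pyGet?_of_nonneg _ hn, ← List.getD_eq_getElem?_getD,
      hd n.toNat (by omega)]
  rw [PySem.Int.mod_eq_emod_of_pos (by norm_num)]
  exact decide_eq_decide.mpr
    (by constructor <;> intro h
        · omega
        · exact ⟨le_rfl, by omega⟩)
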